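-- pv_equiv track=rewrite | github.com/Lukifuki1/Mia | tests/stress/test_concurrent_users_stress_stress.py | _simulate_intensive_operation
-- ===== SOURCE A (Python) =====
-- def _simulate_intensive_operation(thread_id, operation_id):
--     """Simulate intensive operation"""
--     try:
--         # CPU intensive task
--         result = sum(i * i for i in range(1000))
--
--         # Memory allocation
--         temp_data = [i for i in range(100)]
--
--         # Simulate processing
--         processed_result = {
--             "thread_id": thread_id,
--             "operation_id": operation_id,
--             "result": result,
--             "data_size": len(temp_data)
--         }
--
--         return processed_result
--
--     except Exception as e:
--         return None
-- ===== SOURCE B (Python) =====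
-- def _simulate_intensive_operation(thread_id, operation_id):
--     # closed-form sum of squares over range(n) instead of the loop
--     n = 1000
--     keys = ["thread_id", "operation_id", "result", "data_size"]
--     values = [thread_id, operation_id, (n - 1) * n * (2 * n - 1) // 6, 100]
--     return dict(zip(keys, values))
-- ===== Notes on version B (the rewrite author's own statement) =====
-- stated objective: simpler
-- what changed: Replaces the 1000-iteration sum-of-squares loop with the closed-form formula (n-1)n(2n-1)//6, drops the 100-element list allocation in favour of the constant size 100, and assembles the result dict by zipping a key list with a value list.
import Mathlib
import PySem

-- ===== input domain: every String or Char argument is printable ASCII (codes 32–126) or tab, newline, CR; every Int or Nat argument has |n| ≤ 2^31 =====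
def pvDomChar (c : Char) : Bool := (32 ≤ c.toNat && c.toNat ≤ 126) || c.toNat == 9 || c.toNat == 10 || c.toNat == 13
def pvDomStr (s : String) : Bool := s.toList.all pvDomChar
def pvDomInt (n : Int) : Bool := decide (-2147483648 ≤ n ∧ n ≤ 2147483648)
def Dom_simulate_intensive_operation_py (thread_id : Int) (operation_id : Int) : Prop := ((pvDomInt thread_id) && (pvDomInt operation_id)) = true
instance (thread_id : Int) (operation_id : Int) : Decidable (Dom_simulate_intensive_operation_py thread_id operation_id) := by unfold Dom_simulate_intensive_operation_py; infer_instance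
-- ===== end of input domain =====

-- B replaces the 1000-step sum-of-squares loop with the closed-form formula, the 100-element list with a constant, and builds the dict by zipping keys with values (simpler).


-- ===== PORT A =====
def simulate_intensive_operation_py (thread_id : Int) (operation_id : Int) : Option (List (String × Int)) :=
  -- result = sum(i * i for i in range(1000))
  let result : Int := (PySem.List.pyRange 0 1000 1).foldl (fun acc i => acc + i * i) 0
  -- temp_data = [i for i in range(100)]
  let temp_data : List Int := (PySem.List.pyRange 0 100 1).map (fun i => i)
  some [("thread_id", thread_id), ("operation_id", operation_id),
        ("result", result), ("data_size", (temp_data.length : Int))]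

-- ===== PORT B =====
def simulate_intensive_operation_py_alt (thread_id : Int) (operation_id : Int) : Option (List (String × Int)) :=
  let n : Int := 1000
  let keys : List String := ["thread_id", "operation_id", "result", "data_size"]
  let values : List Int := [thread_id, operation_id, PySem.Int.floordiv ((n - 1) * n * (2 * n - 1)) 6, 100]
  some (List.zip keys values)

-- ===== PRECONDITION & SPEC =====
def Spec_simulate_intensive_operation_py (thread_id : Int) (operation_id : Int) (out : Option (List (String × Int))) : Prop := out = simulate_intensive_operation_py_alt thread_id operation_id
instance (thread_id : Int) (operation_id : Int) (out : Option (List (String × Int))) : Decidable (Spec_simulate_intensive_operation_py thread_id operation_id out) := by unfold Spec_simulate_intensive_operation_py; infer_instance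

-- ===== CLAIM (what is proved, stated in full; the proofs are below) =====
def Claim_equal_simulate_intensive_operation_py : Prop := ∀ (thread_id : Int) (operation_id : Int), Dom_simulate_intensive_operation_py thread_id operation_id → Spec_simulate_intensive_operation_py thread_id operation_id (simulate_intensive_operation_py thread_id operation_id)

-- ===== LEMMAS AND PROOFS =====

set_option maxRecDepth 100000 in
theorem pv_sum_eq : (PySem.List.pyRange 0 1000 1).foldl (fun acc i => acc + i * i) 0
    = PySem.Int.floordiv ((1000 - 1) * 1000 * (2 * 1000 - 1)) 6 := by decide

theorem pv_len_eq : (((PySem.List.pyRange 0 100 1).map (fun i => i)).length : Int) = 100 := by decide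

-- ===== VERDICT =====
theorem simulate_intensive_operation_py_spec : Claim_equal_simulate_intensive_operation_py := by
  intro t o _
  show _ = _
  simp only [simulate_intensive_operation_py, simulate_intensive_operation_py_alt,
    pv_sum_eq, pv_len_eq, List.zip]
  rfl
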